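-- pv_equiv track=rewrite | github.com/ddung1203/TIL | COS_Pro/COS_PRO_6차/큰수와_작은수의_차이.py | solution
-- ===== SOURCE A (Python) =====
-- def solution(arr, K):
-- 	answer = 10001
-- 	lis = []
--
-- 	for i in range(len(arr)):
-- 		for j in range(i+1, len(arr)):
-- 			for l in range(j + 1, len(arr)):
-- 				for k in range(l + 1, len(arr)):
-- 					lis.append([arr[i],arr[j],arr[l],arr[k]])
--
-- 	for i in range(len(lis)):
-- 		mi = min(lis[i])
-- 		ma = max(lis[i])
-- 		if answer > ma - mi:
-- 			answer = ma - mi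
--
-- 	return answer
-- ===== SOURCE B (Python) =====
-- def solution(arr, K):
--     answer = 10001
--     s = sorted(arr)
--     for i in range(len(s) - 3):
--         answer = min(answer, s[i + 3] - s[i])
--     return answer
-- ===== Notes on version B (the rewrite author's own statement) =====
-- stated objective: faster
-- what changed: Replaces the O(n^4) enumeration of all 4-element combinations with sort-then-scan: after sorting, the minimal spread of any 4 elements is the minimal window spread s[i+3]-s[i].
import Mathlib
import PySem

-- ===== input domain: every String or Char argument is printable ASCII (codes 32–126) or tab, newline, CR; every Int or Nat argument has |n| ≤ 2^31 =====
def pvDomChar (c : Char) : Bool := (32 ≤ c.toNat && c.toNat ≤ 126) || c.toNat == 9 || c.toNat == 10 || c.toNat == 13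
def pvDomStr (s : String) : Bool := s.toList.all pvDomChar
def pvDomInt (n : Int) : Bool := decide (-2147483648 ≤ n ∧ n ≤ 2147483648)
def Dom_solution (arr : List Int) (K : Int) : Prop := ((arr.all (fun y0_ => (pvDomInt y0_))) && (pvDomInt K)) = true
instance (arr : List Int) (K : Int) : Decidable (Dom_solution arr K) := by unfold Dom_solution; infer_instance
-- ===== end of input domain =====

-- B replaces A's O(n^4) enumeration of all 4-element combinations by sort-then-scan over windows of 4 (objective: faster).
-- ===== PORT A =====
def solution (arr : List Int) (K : Int) : Int :=
  let lis : List (List Int) :=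
    (PySem.List.pyRange 0 (PySem.List.len arr) 1).foldl (fun acc0 i =>
      (PySem.List.pyRange (i + 1) (PySem.List.len arr) 1).foldl (fun acc1 j =>
        (PySem.List.pyRange (j + 1) (PySem.List.len arr) 1).foldl (fun acc2 l =>
          (PySem.List.pyRange (l + 1) (PySem.List.len arr) 1).foldl (fun acc3 k =>
            acc3 ++ [[PySem.List.pyGetD arr i 0, PySem.List.pyGetD arr j 0,
                      PySem.List.pyGetD arr l 0, PySem.List.pyGetD arr k 0]]) acc2) acc1) acc0) []
  (PySem.List.pyRange 0 (PySem.List.len lis) 1).foldl (fun answer i =>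
    let q := PySem.List.pyGetD lis i []
    let mi := (PySem.List.min? q (fun v => v)).getD 0
    let ma := (PySem.List.max? q (fun v => v)).getD 0
    if answer > ma - mi then ma - mi else answer) 10001

-- ===== PORT B =====
def solution_alt (arr : List Int) (K : Int) : Int :=
  let s := PySem.List.sorted arr (fun v => v) false
  (PySem.List.pyRange 0 (PySem.List.len s - 3) 1).foldl (fun answer i =>
    min answer (PySem.List.pyGetD s (i + 3) 0 - PySem.List.pyGetD s i 0)) 10001

-- ===== PRECONDITION & SPEC =====
def Spec_solution (arr : List Int) (K : Int) (out : Int) : Prop := out = solution_alt arr K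
instance (arr : List Int) (K : Int) (out : Int) : Decidable (Spec_solution arr K out) := by unfold Spec_solution; infer_instance

-- ===== CLAIM (what is proved, stated in full; the proofs are below) =====
def Claim_equal_solution : Prop := ∀ (arr : List Int) (K : Int), Dom_solution arr K → Spec_solution arr K (solution arr K)

-- ===== LEMMAS AND PROOFS =====

-- spread of a quadruple list: max(q) - min(q), exactly as A computes it
def spreadQ (q : List Int) : Int :=
  (PySem.List.max? q (fun v => v)).getD 0 - (PySem.List.min? q (fun v => v)).getD 0

-- the combination list A builds, written as nested flatMaps
def quadsA (arr : List Int) : List (List Int) :=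
  (PySem.List.pyRange 0 (arr.length : Int) 1).flatMap (fun i =>
    (PySem.List.pyRange (i + 1) (arr.length : Int) 1).flatMap (fun j =>
      (PySem.List.pyRange (j + 1) (arr.length : Int) 1).flatMap (fun l =>
        (PySem.List.pyRange (l + 1) (arr.length : Int) 1).map (fun k =>
          [PySem.List.pyGetD arr i 0, PySem.List.pyGetD arr j 0,
           PySem.List.pyGetD arr l 0, PySem.List.pyGetD arr k 0]))))

-- generic running-minimum fold lemmas
theorem foldl_min_le_init {α : Type} (l : List α) (f : α → Int) (c : Int) :
    l.foldl (fun a x => min a (f x)) c ≤ c := by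
  induction l generalizing c with
  | nil => exact le_refl c
  | cons h t ih => exact le_trans (ih (min c (f h))) (min_le_left _ _)

theorem foldl_min_le_mem {α : Type} (l : List α) (f : α → Int) (c : Int) {x : α} (hx : x ∈ l) :
    l.foldl (fun a x => min a (f x)) c ≤ f x := by
  induction l generalizing c with
  | nil => cases hx
  | cons h t ih =>
    rcases List.mem_cons.mp hx with rfl | hx'
    · exact le_trans (foldl_min_le_init t f (min c (f x))) (min_le_right _ _)
    · exact ih (min c (f h)) hx'

theorem foldl_min_cases {α : Type} (l : List α) (f : α → Int) (c : Int) :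
    l.foldl (fun a x => min a (f x)) c = c ∨ ∃ x ∈ l, l.foldl (fun a x => min a (f x)) c = f x := by
  induction l generalizing c with
  | nil => exact Or.inl rfl
  | cons h t ih =>
    rcases ih (min c (f h)) with h1 | ⟨x, hx, h2⟩
    · simp only [List.foldl_cons]
      rcases min_cases c (f h) with ⟨he, _⟩ | ⟨he, _⟩
      · rw [h1, he]; exact Or.inl rfl
      · rw [h1, he]; exact Or.inr ⟨h, List.mem_cons_self, rfl⟩
    · exact Or.inr ⟨x, List.mem_cons_of_mem _ hx, h2⟩

-- pyGetD at a nonnegative in-range Int index, in getD form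
theorem pyGetD_toNat {α : Type} (xs : List α) (i : Int) (d : α)
    (h1 : 0 ≤ i) (h2 : i < (xs.length : Int)) :
    PySem.List.pyGetD xs i d = xs.getD i.toNat d := by
  rw [PySem.List.pyGetD_eq_getElem xs d h1 h2, List.getD_eq_getElem _ _ (by omega)]

-- the second loop of A as a running minimum over the built list
theorem secondloop (lis : List (List Int)) :
    (PySem.List.pyRange 0 ((lis.length : Int)) 1).foldl (fun answer i =>
      if answer > (PySem.List.max? (PySem.List.pyGetD lis i []) (fun v => v)).getD 0 -
                  (PySem.List.min? (PySem.List.pyGetD lis i []) (fun v => v)).getD 0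
      then (PySem.List.max? (PySem.List.pyGetD lis i []) (fun v => v)).getD 0 -
           (PySem.List.min? (PySem.List.pyGetD lis i []) (fun v => v)).getD 0
      else answer) 10001
    = lis.foldl (fun a q => min a (spreadQ q)) 10001 := by
  rw [PySem.List.foldl_pyRange_zero_pyGetD' lis []
      (fun a q => if a > (PySem.List.max? q (fun v => v)).getD 0 -
                         (PySem.List.min? q (fun v => v)).getD 0
                  then (PySem.List.max? q (fun v => v)).getD 0 -
                       (PySem.List.min? q (fun v => v)).getD 0
                  else a) 10001]
  have hfun : (fun (a : Int) (q : List Int) =>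
      if a > (PySem.List.max? q (fun v => v)).getD 0 -
             (PySem.List.min? q (fun v => v)).getD 0
      then (PySem.List.max? q (fun v => v)).getD 0 -
           (PySem.List.min? q (fun v => v)).getD 0
      else a) = fun a q => min a (spreadQ q) := by
    funext a q
    change (if a > spreadQ q then spreadQ q else a) = min a (spreadQ q)
    simp only [min_def]
    split_ifs <;> omega
  rw [hfun]

-- A's value as a running minimum of spreads over quadsA
theorem solutionA_eq (arr : List Int) (K : Int) :
    solution arr K = (quadsA arr).foldl (fun a q => min a (spreadQ q)) 10001 := by
  simp only [solution, quadsA, PySem.List.len_eq,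
    PySem.List.foldl_append_singleton_eq_map, PySem.List.foldl_append_eq_flatMap,
    List.nil_append]
  exact secondloop _

-- membership in quadsA: exactly the 4-element index-increasing selections
theorem mem_quadsA (arr : List Int) (q : List Int) :
    q ∈ quadsA arr ↔ ∃ a b c d : Nat, a < b ∧ b < c ∧ c < d ∧ d < arr.length ∧
      q = [arr.getD a 0, arr.getD b 0, arr.getD c 0, arr.getD d 0] := by
  simp only [quadsA, List.mem_flatMap, List.mem_map, PySem.List.mem_pyRange_one]
  constructor
  · rintro ⟨i, ⟨hi0, hin⟩, j, ⟨hj0, hjn⟩, l, ⟨hl0, hln⟩, k, ⟨hk0, hkn⟩, rfl⟩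
    refine ⟨i.toNat, j.toNat, l.toNat, k.toNat, by omega, by omega, by omega, by omega, ?_⟩
    rw [pyGetD_toNat arr i 0 (by omega) (by omega),
        pyGetD_toNat arr j 0 (by omega) (by omega),
        pyGetD_toNat arr l 0 (by omega) (by omega),
        pyGetD_toNat arr k 0 (by omega) (by omega)]
  · rintro ⟨a, b, c, d, hab, hbc, hcd, hd, rfl⟩
    refine ⟨(a : Int), ⟨by omega, by omega⟩, (b : Int), ⟨by omega, by omega⟩,
            (c : Int), ⟨by omega, by omega⟩, (d : Int), ⟨by omega, by omega⟩, ?_⟩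
    simp [PySem.List.pyGetD_natCast]

-- spread is invariant under permutation
theorem min_getD_perm {q q' : List Int} (h : q.Perm q') (hne : q ≠ []) :
    (PySem.List.min? q (fun v => v)).getD 0 = (PySem.List.min? q' (fun v => v)).getD 0 := by
  have hne' : q' ≠ [] := by
    intro e; exact hne (List.Perm.eq_nil (e ▸ h))
  rcases hq : PySem.List.min? q (fun v => v) with _ | m
  · exact absurd ((PySem.List.min?_eq_none_iff _ _).mp hq) hne
  rcases hq' : PySem.List.min? q' (fun v => v) with _ | m'
  · exact absurd ((PySem.List.min?_eq_none_iff _ _).mp hq') hne'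
  have h1 := PySem.List.min?_isMin hq
  have h2 := PySem.List.min?_isMin hq'
  have hm := PySem.List.min?_mem hq
  have hm' := PySem.List.min?_mem hq'
  simp only [Option.getD_some]
  exact le_antisymm (h1 m' (h.mem_iff.mpr hm')) (h2 m (h.mem_iff.mp hm))

theorem max_getD_perm {q q' : List Int} (h : q.Perm q') (hne : q ≠ []) :
    (PySem.List.max? q (fun v => v)).getD 0 = (PySem.List.max? q' (fun v => v)).getD 0 := by
  have hne' : q' ≠ [] := by
    intro e; exact hne (List.Perm.eq_nil (e ▸ h))
  rcases hq : PySem.List.max? q (fun v => v) with _ | m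
  · exact absurd ((PySem.List.max?_eq_none_iff _ _).mp hq) hne
  rcases hq' : PySem.List.max? q' (fun v => v) with _ | m'
  · exact absurd ((PySem.List.max?_eq_none_iff _ _).mp hq') hne'
  have h1 := PySem.List.max?_isMax hq
  have h2 := PySem.List.max?_isMax hq'
  have hm := PySem.List.max?_mem hq
  have hm' := PySem.List.max?_mem hq'
  simp only [Option.getD_some]
  exact le_antisymm (h2 m (h.mem_iff.mp hm)) (h1 m' (h.mem_iff.mpr hm'))

theorem spreadQ_perm {q q' : List Int} (h : q.Perm q') : spreadQ q = spreadQ q' := by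
  rcases q with _ | ⟨x, t⟩
  · rw [List.Perm.eq_nil h.symm]
  · rw [spreadQ, spreadQ, min_getD_perm h (by simp), max_getD_perm h (by simp)]

-- spread of an already-ordered quadruple
theorem spreadQ_sorted {a b c d : Int} (h1 : a ≤ b) (h2 : b ≤ c) (h3 : c ≤ d) :
    spreadQ [a, b, c, d] = d - a := by
  rw [spreadQ, PySem.List.min?_id_cons, PySem.List.max?_id_cons]
  simp only [List.foldl_cons, List.foldl_nil, Option.getD_some]
  omega

-- a selection at strictly increasing indices is a sublist
theorem quad_sublist (t : List Int) (a b c d : Nat)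
    (h1 : a < b) (h2 : b < c) (h3 : c < d) (h4 : d < t.length) :
    List.Sublist [t.getD a 0, t.getD b 0, t.getD c 0, t.getD d 0] t := by
  have hdrop : ∀ (m n : Nat), m ≤ n → List.Sublist (t.drop n) (t.drop m) := by
    intro m n hmn
    rw [show n = m + (n - m) by omega, ← List.drop_drop]
    exact List.drop_sublist _ _
  rw [List.getD_eq_getElem _ _ (show a < t.length by omega),
      List.getD_eq_getElem _ _ (show b < t.length by omega),
      List.getD_eq_getElem _ _ (show c < t.length by omega),
      List.getD_eq_getElem _ _ h4]
  have s4 : List.Sublist [t[d]] (t.drop (c + 1)) := by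
    rw [List.singleton_sublist]
    have : (t.drop (c + 1))[d - (c + 1)]'(by simp; omega) = t[d] := by
      rw [List.getElem_drop]; congr 1; omega
    exact this ▸ List.getElem_mem _
  have s3 : List.Sublist [t[c], t[d]] (t.drop c) := by
    rw [← List.getElem_cons_drop (show c < t.length by omega)]
    exact s4.cons₂ _
  have s2 : List.Sublist [t[b], t[c], t[d]] (t.drop b) := by
    rw [← List.getElem_cons_drop (show b < t.length by omega)]
    exact (s3.trans (hdrop _ _ (by omega))).cons₂ _
  have s1 : List.Sublist [t[a], t[b], t[c], t[d]] (t.drop a) := by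
    rw [← List.getElem_cons_drop (show a < t.length by omega)]
    exact (s2.trans (hdrop _ _ (by omega))).cons₂ _
  exact s1.trans (List.drop_sublist _ _)

-- a 4-element sublist occurs at strictly increasing indices
theorem quad_of_sublist {t : List Int} {w x y z : Int} (h : List.Sublist [w, x, y, z] t) :
    ∃ a b c d : Nat, a < b ∧ b < c ∧ c < d ∧ d < t.length ∧
      t.getD a 0 = w ∧ t.getD b 0 = x ∧ t.getD c 0 = y ∧ t.getD d 0 = z := by
  obtain ⟨f, hf⟩ := List.sublist_iff_exists_orderEmbedding_getElem?_eq.mp h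
  have h0 := (hf 0).symm
  have h1 := (hf 1).symm
  have h2 := (hf 2).symm
  have h3 := (hf 3).symm
  simp only [List.getElem?_cons_zero, List.getElem?_cons_succ] at h0 h1 h2 h3
  obtain ⟨hb0, he0⟩ := List.getElem?_eq_some_iff.mp h0
  obtain ⟨hb1, he1⟩ := List.getElem?_eq_some_iff.mp h1
  obtain ⟨hb2, he2⟩ := List.getElem?_eq_some_iff.mp h2
  obtain ⟨hb3, he3⟩ := List.getElem?_eq_some_iff.mp h3
  have hm := f.strictMono
  refine ⟨f 0, f 1, f 2, f 3,
    hm (by omega), hm (by omega), hm (by omega), hb3, ?_, ?_, ?_, ?_⟩ <;>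
    rw [List.getD_eq_getElem] <;> assumption

-- monotonicity of the sorted list, in getD form
theorem sorted_getD_mono (xs : List Int) (p q : Nat) (hpq : p ≤ q)
    (hq : q < (PySem.List.sorted xs (fun v => v) false).length) :
    (PySem.List.sorted xs (fun v => v) false).getD p 0 ≤
      (PySem.List.sorted xs (fun v => v) false).getD q 0 := by
  rw [List.getD_eq_getElem _ _ (lt_of_le_of_lt hpq hq), List.getD_eq_getElem _ _ hq]
  exact PySem.List.sorted_id_getElem_mono xs hpq hq

theorem solution_eq_alt (arr : List Int) (K : Int) : solution arr K = solution_alt arr K := by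
  have hperm : (PySem.List.sorted arr (fun v => v) false).Perm arr := PySem.List.sorted_perm arr (fun v => v) false
  have hlen : (PySem.List.sorted arr (fun v => v) false).length = arr.length := hperm.length_eq
  have hB : solution_alt arr K =
      (PySem.List.pyRange 0 (((PySem.List.sorted arr (fun v => v) false).length : Int) - 3) 1).foldl
        (fun a i => min a (PySem.List.pyGetD (PySem.List.sorted arr (fun v => v) false) (i + 3) 0 - PySem.List.pyGetD (PySem.List.sorted arr (fun v => v) false) i 0))
        10001 := by
    simp only [solution_alt, PySem.List.len_eq]
  rw [solutionA_eq arr K, hB]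
  apply le_antisymm
  · rcases foldl_min_cases (PySem.List.pyRange 0 (((PySem.List.sorted arr (fun v => v) false).length : Int) - 3) 1)
      (fun i => PySem.List.pyGetD (PySem.List.sorted arr (fun v => v) false) (i + 3) 0 - PySem.List.pyGetD (PySem.List.sorted arr (fun v => v) false) i 0) 10001
      with h | ⟨i, hi, h⟩
    · rw [(h : (PySem.List.pyRange 0 (((PySem.List.sorted arr (fun v => v) false).length : Int) - 3) 1).foldl
        (fun a i => min a (PySem.List.pyGetD (PySem.List.sorted arr (fun v => v) false) (i + 3) 0 - PySem.List.pyGetD (PySem.List.sorted arr (fun v => v) false) i 0))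
        10001 = 10001)]
      exact foldl_min_le_init _ spreadQ _
    · obtain ⟨hi0, hilt⟩ := (PySem.List.mem_pyRange_one).mp hi
      rw [(h : (PySem.List.pyRange 0 (((PySem.List.sorted arr (fun v => v) false).length : Int) - 3) 1).foldl
        (fun a i => min a (PySem.List.pyGetD (PySem.List.sorted arr (fun v => v) false) (i + 3) 0 - PySem.List.pyGetD (PySem.List.sorted arr (fun v => v) false) i 0))
        10001 = PySem.List.pyGetD (PySem.List.sorted arr (fun v => v) false) (i + 3) 0 - PySem.List.pyGetD (PySem.List.sorted arr (fun v => v) false) i 0)]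
      have hp3 : i.toNat + 3 < (PySem.List.sorted arr (fun v => v) false).length := by omega
      have hw := quad_sublist (PySem.List.sorted arr (fun v => v) false) i.toNat (i.toNat + 1) (i.toNat + 2) (i.toNat + 3)
        (by omega) (by omega) (by omega) hp3
      obtain ⟨q', hq'p, hq's⟩ := (List.Perm.subperm_left hperm).mp hw.subperm
      obtain ⟨w0, x0, y0, z0, rfl⟩ : ∃ w0 x0 y0 z0, q' = [w0, x0, y0, z0] := by
        have h4 : q'.length = 4 := by simpa using hq'p.length_eq
        match q', h4 with
        | [w0, x0, y0, z0], _ => exact ⟨_, _, _, _, rfl⟩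
      obtain ⟨a, b, c, d, hab, hbc, hcd, hdlen, ha, hb2, hc2, hd2⟩ := quad_of_sublist hq's
      have hmem : [w0, x0, y0, z0] ∈ quadsA arr :=
        (mem_quadsA arr _).mpr ⟨a, b, c, d, hab, hbc, hcd, hdlen, by rw [ha, hb2, hc2, hd2]⟩
      have hle : (quadsA arr).foldl (fun a q => min a (spreadQ q)) 10001 ≤ spreadQ [w0, x0, y0, z0] :=
        foldl_min_le_mem _ spreadQ _ hmem
      have hsp : spreadQ [w0, x0, y0, z0] =
          (PySem.List.sorted arr (fun v => v) false).getD (i.toNat + 3) 0 - (PySem.List.sorted arr (fun v => v) false).getD i.toNat 0 := by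
        rw [spreadQ_perm hq'p,
            spreadQ_sorted (sorted_getD_mono arr i.toNat (i.toNat + 1) (by omega) (by omega))
              (sorted_getD_mono arr (i.toNat + 1) (i.toNat + 2) (by omega) (by omega))
              (sorted_getD_mono arr (i.toNat + 2) (i.toNat + 3) (by omega) hp3)]
      have hfi : PySem.List.pyGetD (PySem.List.sorted arr (fun v => v) false) (i + 3) 0 - PySem.List.pyGetD (PySem.List.sorted arr (fun v => v) false) i 0 =
          (PySem.List.sorted arr (fun v => v) false).getD (i.toNat + 3) 0 - (PySem.List.sorted arr (fun v => v) false).getD i.toNat 0 := by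
        rw [pyGetD_toNat (PySem.List.sorted arr (fun v => v) false) (i + 3) 0 (by omega) (by omega),
            pyGetD_toNat (PySem.List.sorted arr (fun v => v) false) i 0 (by omega) (by omega),
            show (i + 3).toNat = i.toNat + 3 by omega]
      rw [hfi, ← hsp]
      exact hle
  · rcases foldl_min_cases (quadsA arr) spreadQ 10001 with h | ⟨q, hq, h⟩
    · rw [(h : (quadsA arr).foldl (fun a q => min a (spreadQ q)) 10001 = 10001)]
      exact foldl_min_le_init _ _ _
    · rw [(h : (quadsA arr).foldl (fun a q => min a (spreadQ q)) 10001 = spreadQ q)]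
      obtain ⟨a, b, c, d, hab, hbc, hcd, hdlen, rfl⟩ := (mem_quadsA arr q).mp hq
      have hqs := quad_sublist arr a b c d hab hbc hcd hdlen
      obtain ⟨q', hq'p, hq's⟩ := (List.Perm.subperm_left hperm.symm).mp hqs.subperm
      obtain ⟨w0, x0, y0, z0, rfl⟩ : ∃ w0 x0 y0 z0, q' = [w0, x0, y0, z0] := by
        have h4 : q'.length = 4 := by simpa using hq'p.length_eq
        match q', h4 with
        | [w0, x0, y0, z0], _ => exact ⟨_, _, _, _, rfl⟩
      obtain ⟨p1, p2, p3, p4, h12, h23, h34, hp4, hw0, hx0, hy0, hz0⟩ := quad_of_sublist hq's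
      have hsp : spreadQ [arr.getD a 0, arr.getD b 0, arr.getD c 0, arr.getD d 0] =
          (PySem.List.sorted arr (fun v => v) false).getD p4 0 - (PySem.List.sorted arr (fun v => v) false).getD p1 0 := by
        rw [← spreadQ_perm hq'p, ← hw0, ← hx0, ← hy0, ← hz0,
            spreadQ_sorted (sorted_getD_mono arr p1 p2 (by omega) (by omega))
              (sorted_getD_mono arr p2 p3 (by omega) (by omega))
              (sorted_getD_mono arr p3 p4 (by omega) hp4)]
      have hmemB : ((p1 : Int)) ∈ PySem.List.pyRange 0 (((PySem.List.sorted arr (fun v => v) false).length : Int) - 3) 1 :=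
        (PySem.List.mem_pyRange_one).mpr ⟨by omega, by omega⟩
      have hleB := foldl_min_le_mem (PySem.List.pyRange 0 (((PySem.List.sorted arr (fun v => v) false).length : Int) - 3) 1)
        (fun i => PySem.List.pyGetD (PySem.List.sorted arr (fun v => v) false) (i + 3) 0 - PySem.List.pyGetD (PySem.List.sorted arr (fun v => v) false) i 0) 10001 hmemB
      have hfi : PySem.List.pyGetD (PySem.List.sorted arr (fun v => v) false) ((p1 : Int) + 3) 0 - PySem.List.pyGetD (PySem.List.sorted arr (fun v => v) false) (p1 : Int) 0 =
          (PySem.List.sorted arr (fun v => v) false).getD (p1 + 3) 0 - (PySem.List.sorted arr (fun v => v) false).getD p1 0 := by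
        rw [pyGetD_toNat (PySem.List.sorted arr (fun v => v) false) ((p1 : Int) + 3) 0 (by omega) (by omega),
            pyGetD_toNat (PySem.List.sorted arr (fun v => v) false) (p1 : Int) 0 (by omega) (by omega),
            show ((p1 : Int) + 3).toNat = p1 + 3 by omega, Int.toNat_natCast]
      have hwin : (PySem.List.sorted arr (fun v => v) false).getD (p1 + 3) 0 ≤ (PySem.List.sorted arr (fun v => v) false).getD p4 0 :=
        sorted_getD_mono arr (p1 + 3) p4 (by omega) hp4
      have this2 : (PySem.List.pyRange 0 (((PySem.List.sorted arr (fun v => v) false).length : Int) - 3) 1).foldl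
          (fun a i => min a (PySem.List.pyGetD (PySem.List.sorted arr (fun v => v) false) (i + 3) 0 - PySem.List.pyGetD (PySem.List.sorted arr (fun v => v) false) i 0))
          10001 ≤
          PySem.List.pyGetD (PySem.List.sorted arr (fun v => v) false) ((p1 : Int) + 3) 0 - PySem.List.pyGetD (PySem.List.sorted arr (fun v => v) false) (p1 : Int) 0 := hleB
      rw [hfi] at this2
      rw [hsp]
      omega


-- ===== VERDICT (by name: the statement is the Claim_ definition above) =====
theorem solution_spec : Claim_equal_solution := by
  intro arr K _
  unfold Spec_solution
  exact solution_eq_alt arr K
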